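-- pv_equiv track=rewrite | github.com/ENFStudios/mister-companion-macos | core/extras_ra_cores.py | _select_rbf_asset
-- ===== SOURCE A (Python) =====
-- def _select_rbf_asset(release: dict, title: str) -> dict:
--     zip_asset = None
--     for asset in release.get("assets", []):
--         name = asset.get("name", "")
--         url = asset.get("url", "")
--         lower_name = name.lower()
--         lower_url = url.lower()
--
--         if lower_name.endswith(".rbf") or lower_url.endswith(".rbf"):
--             return asset
--
--         if lower_name.endswith(".zip") or lower_url.endswith(".zip"):
--             zip_asset = asset
--
--     if zip_asset:
--         return zip_asset
--
--     raise RuntimeError(f"Unable to find an RBF or ZIP asset in the latest {title} release.")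
-- ===== SOURCE B (Python) =====
-- def _matches(asset, ext):
--     name = asset.get("name", "")
--     url = asset.get("url", "")
--     return name.lower().endswith(ext) or url.lower().endswith(ext)
--
--
-- def _select_rbf_asset(release: dict, title: str) -> dict:
--     assets = release.get("assets", [])
--     rbf = next((a for a in assets if _matches(a, ".rbf")), None)
--     if rbf is not None:
--         return rbf
--     zip_a = next((a for a in reversed(assets) if _matches(a, ".zip")), None)
--     if zip_a is not None:
--         return zip_a
--     raise RuntimeError(f"Unable to find an RBF or ZIP asset in the latest {title} release.")
-- ===== Notes on version B (the rewrite author's own statement) =====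
-- stated objective: simpler
-- what changed: Replaced the single interleaved loop with a zip accumulator by two independent scans: first find the first .rbf asset, otherwise find the last .zip asset by scanning the reversed list.
import Mathlib
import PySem

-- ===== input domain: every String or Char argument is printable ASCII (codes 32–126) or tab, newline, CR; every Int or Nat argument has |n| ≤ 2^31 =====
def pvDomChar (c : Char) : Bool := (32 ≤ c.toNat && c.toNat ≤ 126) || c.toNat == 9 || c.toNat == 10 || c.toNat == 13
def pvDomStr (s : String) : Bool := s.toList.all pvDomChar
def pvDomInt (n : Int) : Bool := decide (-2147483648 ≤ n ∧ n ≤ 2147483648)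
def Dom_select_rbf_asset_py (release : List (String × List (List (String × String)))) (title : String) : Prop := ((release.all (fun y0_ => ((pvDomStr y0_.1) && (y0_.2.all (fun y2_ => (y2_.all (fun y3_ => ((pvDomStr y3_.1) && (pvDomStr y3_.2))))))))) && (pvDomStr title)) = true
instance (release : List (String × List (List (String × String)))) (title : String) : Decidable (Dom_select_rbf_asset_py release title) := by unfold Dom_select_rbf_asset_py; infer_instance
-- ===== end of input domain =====

-- B replaces A's single interleaved loop (early return on .rbf, overwritten .zip accumulator)
-- by two independent scans: first .rbf asset, else last .zip asset (first of the reversed list).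
-- Where Python A raises RuntimeError (no matching asset), both ports return [] (excluded by Pre_).

-- ===== PORT A =====
-- assoc-list first-match lookup with default = dict.get(k, dflt) (exact: keys are compared by =)
def pvGetD {ν : Type} (d : List (String × ν)) (k : String) (dflt : ν) : ν :=
  match d.find? (fun p => p.1 = k) with
  | some p => p.2
  | none => dflt

-- shared asset test: asset.get("name","")/asset.get("url","") lowercased endswith ext
def pvMatches (asset : List (String × String)) (ext : String) : Bool :=
  let name := pvGetD asset "name" ""
  let url := pvGetD asset "url" ""
  PySem.Str.endswith (PySem.Str.lower name) ext || PySem.Str.endswith (PySem.Str.lower url) ext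

-- A's loop: early return on .rbf, keep overwriting zip_asset on .zip; at the end
-- 'if zip_asset:' (Python truthiness: set and non-empty dict), else raise → [].
def pvALoop : List (List (String × String)) → Option (List (String × String)) → List (String × String)
  | [], zipAsset =>
      match zipAsset with
      | some z => if z.isEmpty then [] else z
      | none => []
  | asset :: rest, zipAsset =>
      if pvMatches asset ".rbf" then asset
      else if pvMatches asset ".zip" then pvALoop rest (some asset)
      else pvALoop rest zipAsset

def select_rbf_asset_py (release : List (String × List (List (String × String)))) (title : String) : List (String × String) :=
  pvALoop (pvGetD release "assets" []) none

-- ===== PORT B =====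
def select_rbf_asset_py_alt (release : List (String × List (List (String × String)))) (title : String) : List (String × String) :=
  let assets := pvGetD release "assets" []
  match assets.find? (fun a => pvMatches a ".rbf") with
  | some a => a
  | none =>
      match assets.reverse.find? (fun a => pvMatches a ".zip") with
      | some a => a
      | none => []

-- ===== PRECONDITION & SPEC =====
-- Pre_ excludes exactly the inputs on which Python A raises RuntimeError: no asset
-- matching .rbf or .zip.
def Pre_select_rbf_asset_py (release : List (String × List (List (String × String)))) (title : String) : Prop :=
  ∃ a ∈ pvGetD release "assets" [], pvMatches a ".rbf" = true ∨ pvMatches a ".zip" = true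
instance (release : List (String × List (List (String × String)))) (title : String) : Decidable (Pre_select_rbf_asset_py release title) := by unfold Pre_select_rbf_asset_py; infer_instance

def pvWitness_select_rbf_asset_py : (List (String × List (List (String × String)))) × String :=
  ([("assets", [[("name", "core.rbf")]])], "MyCore")

def Spec_select_rbf_asset_py (release : List (String × List (List (String × String)))) (title : String) (out : List (String × String)) : Prop := out = select_rbf_asset_py_alt release title
instance (release : List (String × List (List (String × String)))) (title : String) (out : List (String × String)) : Decidable (Spec_select_rbf_asset_py release title out) := by unfold Spec_select_rbf_asset_py; infer_instance

-- ===== CLAIM (what is proved, stated in full; the proofs are below) =====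
def Claim_equal_select_rbf_asset_py : Prop := ∀ (release : List (String × List (List (String × String)))) (title : String), Dom_select_rbf_asset_py release title → Pre_select_rbf_asset_py release title → Spec_select_rbf_asset_py release title (select_rbf_asset_py release title)

-- ===== LEMMAS AND PROOFS =====

-- an asset matching ".zip" is a non-empty dict (both lookup defaults are "")
theorem pvMatches_zip_ne_nil {asset : List (String × String)}
    (hm : pvMatches asset ".zip" = true) : asset ≠ [] := by
  intro h; subst h; exact absurd hm (by decide)

-- invariant of A's loop: its result is the first .rbf asset, else the last .zip asset
-- (first of the reversed list), else what the accumulator's final value yields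
theorem pvALoop_eq (assets : List (List (String × String)))
    (zipAsset : Option (List (String × String))) :
    pvALoop assets zipAsset =
      match assets.find? (fun a => pvMatches a ".rbf") with
      | some a => a
      | none =>
          match assets.reverse.find? (fun a => pvMatches a ".zip") with
          | some a => a
          | none =>
              match zipAsset with
              | some z => if z.isEmpty then [] else z
              | none => [] := by
  induction assets generalizing zipAsset with
  | nil => simp [pvALoop]
  | cons a rest ih =>
    cases hr : pvMatches a ".rbf" with
    | true => simp [pvALoop, hr]
    | false =>
      cases hz : pvMatches a ".zip" with
      | false =>
        simp only [pvALoop, hr, hz, Bool.false_eq_true, if_false, ih,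
          List.find?_cons, List.reverse_cons, List.find?_append]
        cases rest.find? (fun a => pvMatches a ".rbf") <;>
          cases rest.reverse.find? (fun a => pvMatches a ".zip") <;> simp
      | true =>
        have hne : a ≠ [] := pvMatches_zip_ne_nil hz
        simp only [pvALoop, hr, hz, Bool.false_eq_true, if_false, if_true, ih,
          List.find?_cons, List.reverse_cons, List.find?_append]
        cases rest.find? (fun a => pvMatches a ".rbf") <;>
          cases rest.reverse.find? (fun a => pvMatches a ".zip") <;>
            simp [List.isEmpty_iff, hne]

-- ===== VERDICT (by name: the statement is the Claim_ definition above) =====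
theorem select_rbf_asset_py_spec : Claim_equal_select_rbf_asset_py := by
  intro release title _ _
  show select_rbf_asset_py release title = select_rbf_asset_py_alt release title
  simp only [select_rbf_asset_py, select_rbf_asset_py_alt, pvALoop_eq]
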